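-- pv_equiv track=rewrite | github.com/ikostan/python | solutions/python/flower-field/3/flower_field.py | _calc_flower_right
-- ===== SOURCE A (Python) =====
-- def _calc_flower_right(i_row: int, i_col: int, garden: list) -> int:
--     """
--     Count contiguous flowers to the right of the current position.
--
--     Scans rightward from ``(i_row, i_col + 1)`` until a non-flower character is
--     found or the row boundary is reached.
--
--     :param int i_row: Current row index.
--     :param int i_col: Current column index.
--     :param list garden: The garden as a list of strings.
--     :returns: Number of adjacent ``*`` cells to the right.
--     :rtype: int
--     """
--     flower_count: int = 0
--
--     if i_col + 1 < len(garden[i_row]):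
--         for char in garden[i_row][i_col + 1:]:
--             if char == "*":
--                 flower_count += 1
--             else:
--                 break
--     return flower_count
-- ===== SOURCE B (Python) =====
-- def _calc_flower_right(i_row: int, i_col: int, garden: list) -> int:
--     s = garden[i_row][i_col + 1:]
--     return len(s) - len(s.lstrip('*'))
-- ===== Notes on version B (the rewrite author's own statement) =====
-- stated objective: idiomatic
-- what changed: Replaces the explicit char-by-char loop with break and length guard by a closed-form string computation: take the right-hand slice and return len(s) - len(s.lstrip('*')).
import Mathlib
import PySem

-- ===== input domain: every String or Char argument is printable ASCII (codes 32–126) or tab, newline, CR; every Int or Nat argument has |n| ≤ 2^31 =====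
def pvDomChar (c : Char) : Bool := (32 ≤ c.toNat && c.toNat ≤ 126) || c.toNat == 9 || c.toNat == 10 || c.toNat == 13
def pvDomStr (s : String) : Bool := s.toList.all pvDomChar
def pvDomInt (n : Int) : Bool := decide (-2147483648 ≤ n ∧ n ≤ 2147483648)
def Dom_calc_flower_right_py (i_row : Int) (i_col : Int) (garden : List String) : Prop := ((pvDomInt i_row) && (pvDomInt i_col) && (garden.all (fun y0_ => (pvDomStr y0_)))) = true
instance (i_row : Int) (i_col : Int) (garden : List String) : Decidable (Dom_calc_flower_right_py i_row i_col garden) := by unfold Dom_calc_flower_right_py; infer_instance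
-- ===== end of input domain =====

-- ===== PORT A =====
-- B is the idiomatic closed form: len(slice) - len(slice.lstrip('*')); A is the explicit loop with break.
-- loop 'for char in …: if char == "*": count += 1 else: break'
def pvLoopA : List Char → Int → Int
  | [], acc => acc
  | c :: rest, acc => if c = '*' then pvLoopA rest (acc + 1) else acc

def calc_flower_right_py (i_row : Int) (i_col : Int) (garden : List String) : Int :=
  let row := ((PySem.List.pyGet? garden i_row).getD "").toList  -- garden[i_row]; Pre_ guarantees the index is in range
  if i_col + 1 < (row.length : Int) then
    pvLoopA (PySem.Chars.slice row (some (i_col + 1)) none) 0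
  else 0

-- ===== PORT B =====
def calc_flower_right_py_alt (i_row : Int) (i_col : Int) (garden : List String) : Int :=
  let s := PySem.Chars.slice (((PySem.List.pyGet? garden i_row).getD "").toList) (some (i_col + 1)) none
  -- s.lstrip('*') drops exactly the leading '*' characters: dropWhile (· == '*') is exact here
  (s.length : Int) - ((s.dropWhile (fun c => c == '*')).length : Int)

-- ===== PRECONDITION & SPEC =====
-- A (and B) raise IndexError iff i_row is not a valid Python index into garden.
def Pre_calc_flower_right_py (i_row : Int) (i_col : Int) (garden : List String) : Prop :=
  PySem.Raise.InRange garden.length i_row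
instance (i_row : Int) (i_col : Int) (garden : List String) : Decidable (Pre_calc_flower_right_py i_row i_col garden) := by unfold Pre_calc_flower_right_py; infer_instance
def pvWitness_calc_flower_right_py : Int × Int × List String := (0, 0, ["*.*"])

def Spec_calc_flower_right_py (i_row : Int) (i_col : Int) (garden : List String) (out : Int) : Prop := out = calc_flower_right_py_alt i_row i_col garden
instance (i_row : Int) (i_col : Int) (garden : List String) (out : Int) : Decidable (Spec_calc_flower_right_py i_row i_col garden out) := by unfold Spec_calc_flower_right_py; infer_instance

-- ===== CLAIM (what is proved, stated in full; the proofs are below) =====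
def Claim_equal_calc_flower_right_py : Prop := ∀ (i_row : Int) (i_col : Int) (garden : List String), Dom_calc_flower_right_py i_row i_col garden → Pre_calc_flower_right_py i_row i_col garden → Spec_calc_flower_right_py i_row i_col garden (calc_flower_right_py i_row i_col garden)

-- ===== LEMMAS AND PROOFS =====
theorem pvLoopA_eq (s : List Char) (acc : Int) :
    pvLoopA s acc = acc + ((s.takeWhile (fun c => c == '*')).length : Int) := by
  induction s generalizing acc with
  | nil => simp [pvLoopA]
  | cons c rest ih =>
    by_cases h : c = '*'
    · simp [pvLoopA, h, ih]; omega
    · simp [pvLoopA, h]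

theorem pvLen_split (s : List Char) :
    (s.length : Int) - ((s.dropWhile (fun c => c == '*')).length : Int)
      = ((s.takeWhile (fun c => c == '*')).length : Int) := by
  have h := congrArg List.length (List.takeWhile_append_dropWhile (p := fun c => c == '*') (l := s))
  simp only [List.length_append] at h
  omega

theorem pvKey (s : List Char) :
    pvLoopA s 0 = (s.length : Int) - ((s.dropWhile (fun c => c == '*')).length : Int) := by
  rw [pvLoopA_eq, pvLen_split]
  omega

-- ===== VERDICT (by name: the statement is the Claim_ definition above) =====
theorem calc_flower_right_py_spec : Claim_equal_calc_flower_right_py := by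
  intro i_row i_col garden _ _
  unfold Spec_calc_flower_right_py
  simp only [calc_flower_right_py, calc_flower_right_py_alt]
  by_cases h : i_col + 1 < ((((PySem.List.pyGet? garden i_row).getD "").toList).length : Int)
  · rw [if_pos h]
    exact pvKey _
  · rw [if_neg h]
    have h0 : (0:Int) ≤ i_col + 1 := by
      have : (0:Int) ≤ ((((PySem.List.pyGet? garden i_row).getD "").toList).length : Int) := Int.natCast_nonneg _
      omega
    have hempty : PySem.List.slice (((PySem.List.pyGet? garden i_row).getD "").toList) (some (i_col + 1)) none = [] := by
      rw [PySem.List.slice_from _ h0]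
      exact List.drop_eq_nil_of_le (by omega)
    simp [hempty]
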